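-- pv_equiv track=rewrite | github.com/jasonsherman/sitetoagent-backend | app/utils.py | prioritize_links
-- ===== SOURCE A (Python) =====
-- def prioritize_links(links):
--     priority_keywords = ['price', 'pricing', 'cost', 'plans', 'subscription']
--     prioritized = []
--     others = []
--     for link in links:
--         if any(keyword in link.lower() for keyword in priority_keywords):
--             prioritized.append(link)
--         else:
--             others.append(link)
--     # Prioritize links with keywords by putting them first
--     return prioritized + others
-- ===== SOURCE B (Python) =====
-- def prioritize_links(links):
--     priority_keywords = ['price', 'pricing', 'cost', 'plans', 'subscription']
--     return sorted(links,
--                   key=lambda link: 0 if any(kw in link.lower() for kw in priority_keywords) else 1)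
-- ===== Notes on version B (the rewrite author's own statement) =====
-- stated objective: idiomatic
-- what changed: Replaces the explicit two-bucket partition loop with a single stable sort keyed 0/1 on keyword presence; stability preserves within-group order, so the result is identical.
import Mathlib
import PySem

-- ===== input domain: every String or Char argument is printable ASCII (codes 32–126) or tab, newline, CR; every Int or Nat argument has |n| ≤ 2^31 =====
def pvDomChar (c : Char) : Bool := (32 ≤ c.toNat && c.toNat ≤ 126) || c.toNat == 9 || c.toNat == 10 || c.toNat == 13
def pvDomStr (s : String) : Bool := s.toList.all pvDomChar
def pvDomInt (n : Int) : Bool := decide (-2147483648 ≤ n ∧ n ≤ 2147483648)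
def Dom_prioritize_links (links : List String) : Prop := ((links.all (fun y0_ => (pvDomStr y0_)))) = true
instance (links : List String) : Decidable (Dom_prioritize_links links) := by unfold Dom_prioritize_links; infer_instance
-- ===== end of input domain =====

-- B replaces A's two-bucket partition loop with a single stable sort on a 0/1 key (idiomatic; same cost).


-- ===== PORT A =====
def pvKeywords : List String := ["price", "pricing", "cost", "plans", "subscription"]

-- any(keyword in link.lower() for keyword in priority_keywords)
def pvIsPriority (link : String) : Bool :=
  pvKeywords.any (fun kw => PySem.Str.isIn kw (PySem.Str.lower link))

def prioritize_links (links : List String) : List String :=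
  let r := links.foldl
    (fun (acc : List String × List String) link =>
      if pvIsPriority link then (acc.1 ++ [link], acc.2) else (acc.1, acc.2 ++ [link]))
    ([], [])
  r.1 ++ r.2

-- ===== PORT B =====
def pvKey (link : String) : Int := if pvIsPriority link then 0 else 1

def prioritize_links_alt (links : List String) : List String :=
  PySem.List.sorted links pvKey

-- ===== PRECONDITION & SPEC =====
def Spec_prioritize_links (links : List String) (out : List String) : Prop := out = prioritize_links_alt links
instance (links : List String) (out : List String) : Decidable (Spec_prioritize_links links out) := by unfold Spec_prioritize_links; infer_instance

-- ===== CLAIM (what is proved, stated in full; the proofs are below) =====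
def Claim_equal_prioritize_links : Prop := ∀ (links : List String), Dom_prioritize_links links → Spec_prioritize_links links (prioritize_links links)

-- ===== LEMMAS AND PROOFS =====

-- A's loop, from any accumulators, appends the two filters of the remaining list.
theorem pv_foldl_partition (xs : List String) (a b : List String) :
    xs.foldl
      (fun (acc : List String × List String) link =>
        if pvIsPriority link then (acc.1 ++ [link], acc.2) else (acc.1, acc.2 ++ [link]))
      (a, b)
    = (a ++ xs.filter pvIsPriority, b ++ xs.filter (fun x => !pvIsPriority x)) := by
  induction xs generalizing a b with
  | nil => simp
  | cons x xs ih =>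
    by_cases h : pvIsPriority x = true
    · simp [List.foldl_cons, h, ih, List.append_assoc]
    · simp at h
      simp [List.foldl_cons, h, ih, List.append_assoc]

-- Stable insertion of x into (priority block ++ non-priority block).
theorem pv_insertBy_blocks (x : String) (A B : List String)
    (hA : ∀ a ∈ A, pvIsPriority a = true) (hB : ∀ b ∈ B, pvIsPriority b = false) :
    PySem.List.insertBy (fun a b => decide (pvKey a < pvKey b)) x (A ++ B)
    = if pvIsPriority x then A ++ x :: B else (A ++ B) ++ [x] := by
  by_cases hx : pvIsPriority x = true
  · simp only [hx, if_true]
    induction A with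
    | nil =>
      cases B with
      | nil => simp [PySem.List.insertBy]
      | cons b bs =>
        have hb : pvIsPriority b = false := hB b (by simp)
        simp [PySem.List.insertBy, pvKey, hx, hb]
    | cons a as ih =>
      have ha : pvIsPriority a = true := hA a (by simp)
      have hcond : decide (pvKey x < pvKey a) = false := by simp [pvKey, hx, ha]
      simp [PySem.List.insertBy, hcond, ih (fun a' ha' => hA a' (by simp [ha']))]
  · simp only [hx]
    apply PySem.List.insertBy_of_forall_not_before
    intro y hy
    rcases List.mem_append.mp hy with h | h
    · simp [pvKey, hx, hA y h]
    · simp [pvKey, hx, hB y h]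

-- B's sort is exactly the two filters concatenated.
theorem pv_sorted_eq_filters (xs : List String) :
    PySem.List.sorted xs pvKey
    = xs.filter pvIsPriority ++ xs.filter (fun x => !pvIsPriority x) := by
  induction xs using List.reverseRecOn with
  | nil => simp [PySem.List.sorted_eq_foldl_insertBy]
  | append_singleton xs x ih =>
    rw [PySem.List.sorted_eq_foldl_insertBy] at *
    rw [List.foldl_append, List.foldl_cons, List.foldl_nil, ih]
    rw [pv_insertBy_blocks x _ _
      (fun a ha => (List.mem_filter.mp ha).2)
      (fun b hb => by simpa using (List.mem_filter.mp hb).2)]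
    by_cases hx : pvIsPriority x = true
    · simp [hx, List.filter_append]
    · simp at hx
      simp [hx, List.filter_append]

-- ===== VERDICT (by name: the statement is the Claim_ definition above) =====
theorem prioritize_links_spec : Claim_equal_prioritize_links := by
  intro links _
  unfold Spec_prioritize_links prioritize_links prioritize_links_alt
  rw [pv_foldl_partition, pv_sorted_eq_filters]
  simp
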